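-- pv_equiv track=rewrite | github.com/alex-zaplik/ngs-seq-tool | backend/algorithm.py | _score_indecies
-- ===== SOURCE A (Python) =====
-- def _score_indecies(indecies, raw, row_scores):
--     scoring = {
--         0: {
--             'C': 4,
--             'T': 4,
--             'G': -4,
--             'A': 8
--         },
--
--         1: {
--             'C': 8,
--             'T': -1,
--             'G': -1,
--             'A': 6
--         },
--
--         2: {
--             'C': -1,
--             'T': 8,
--             'G': -1,
--             'A': 6
--         },
--
--         3: {
--             'C': -1,
--             'T': -1,
--             'G': 1,
--             'A': -1
--         }
--     }
--
--     # <3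
--
--     scores = []
--     for i in indecies:
--         score = 0
--         for k, e in enumerate(raw[i]):
--             score += scoring[row_scores[k]][e]
--         scores.append(score)
--     return scores
-- ===== SOURCE B (Python) =====
-- def _score_indecies(indecies, raw, row_scores):
--     # Column-major accumulation over a char-major (transposed) scoring table.
--     SCORING = {
--         'C': [4, 8, -1, -1],
--         'T': [4, -1, 8, -1],
--         'G': [-4, -1, -1, 1],
--         'A': [8, 6, 6, -1],
--     }
--     rows = [raw[i] for i in indecies]
--     width = 0
--     for r in rows:
--         width = max(width, len(r))
--     scores = [0] * len(rows)
--     for k in range(width):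
--         scores = [sc + (SCORING[r[k]][row_scores[k]] if k < len(r) else 0)
--                   for sc, r in zip(scores, rows)]
--     return scores
-- ===== Notes on version B (the rewrite author's own statement) =====
-- stated objective: alternative
-- what changed: Replaces A's row-by-row accumulation over a row-index-major nested dict by a column-major sweep: B transposes the scoring table to a char-major dict of per-row-score lists and updates all selected rows' scores simultaneously position by position (zip/comprehension over a running score vector), guarding ragged rows by length.
import Mathlib
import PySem

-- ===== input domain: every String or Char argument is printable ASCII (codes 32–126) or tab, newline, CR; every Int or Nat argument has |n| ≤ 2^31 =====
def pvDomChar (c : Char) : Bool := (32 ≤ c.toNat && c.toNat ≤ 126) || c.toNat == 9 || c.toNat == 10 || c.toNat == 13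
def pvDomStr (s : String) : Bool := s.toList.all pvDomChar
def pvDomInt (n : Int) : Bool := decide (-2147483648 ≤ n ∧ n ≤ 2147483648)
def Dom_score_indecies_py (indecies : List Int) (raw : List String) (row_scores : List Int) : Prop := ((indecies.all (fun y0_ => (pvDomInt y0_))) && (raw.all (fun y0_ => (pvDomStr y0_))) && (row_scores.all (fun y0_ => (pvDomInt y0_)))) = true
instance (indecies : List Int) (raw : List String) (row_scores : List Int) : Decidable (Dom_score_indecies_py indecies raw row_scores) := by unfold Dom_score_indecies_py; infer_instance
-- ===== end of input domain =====

-- B rewrites A's row-by-row sum as a column-major sweep over a transposed (char-major)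
-- scoring table; objective: alternative decomposition, same exact results on Pre_.

-- ===== PORT A =====
-- A's scoring dict: row-score index -> (nucleotide -> points)
def scoringA : PySem.Dict Int (PySem.Dict Char Int) :=
  PySem.Dict.ofList
    [ (0, PySem.Dict.ofList [('C', 4), ('T', 4), ('G', -4), ('A', 8)])
    , (1, PySem.Dict.ofList [('C', 8), ('T', -1), ('G', -1), ('A', 6)])
    , (2, PySem.Dict.ofList [('C', -1), ('T', 8), ('G', -1), ('A', 6)])
    , (3, PySem.Dict.ofList [('C', -1), ('T', -1), ('G', 1), ('A', -1)]) ]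

def score_indecies_py (indecies : List Int) (raw : List String) (row_scores : List Int) : List Int :=
  indecies.foldl
    (fun scores i =>
      let score :=
        (PySem.List.enumerate (PySem.List.pyGetD raw i "").toList 0).foldl
          (fun sc ke =>
            sc + PySem.Dict.getD
                   (PySem.Dict.getD scoringA (PySem.List.pyGetD row_scores ke.1 0) (PySem.Dict.ofList []))
                   ke.2 0)
          0
      scores ++ [score])
    []

-- ===== PORT B =====
-- B's transposed table: nucleotide -> points per row-score index 0..3
def scoringB : PySem.Dict Char (List Int) :=
  PySem.Dict.ofList
    [ ('C', [4, 8, -1, -1])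
    , ('T', [4, -1, 8, -1])
    , ('G', [-4, -1, -1, 1])
    , ('A', [8, 6, 6, -1]) ]

def score_indecies_py_alt (indecies : List Int) (raw : List String) (row_scores : List Int) : List Int :=
  let rows := indecies.map (fun i => (PySem.List.pyGetD raw i "").toList)
  let width : Int := rows.foldl (fun w r => max w (r.length : Int)) 0
  (PySem.List.pyRange 0 width 1).foldl
    (fun scores k =>
      List.zipWith
        (fun sc r =>
          sc + (if k < (r.length : Int) then
                  PySem.List.pyGetD
                    (PySem.Dict.getD scoringB (PySem.List.pyGetD r k ' ') [])
                    (PySem.List.pyGetD row_scores k 0) 0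
                else 0))
        scores rows)
    (List.replicate rows.length 0)

-- ===== PRECONDITION & SPEC =====
-- Pre_ excludes exactly where A raises: an index i outside raw's Python range (IndexError),
-- a selected row longer than row_scores (IndexError), a row_scores entry outside
-- {0,1,2,3} used at some position of a selected row (KeyError), or a character of a
-- selected row outside 'CTGA' (KeyError).
def Pre_score_indecies_py (indecies : List Int) (raw : List String) (row_scores : List Int) : Prop :=
  ∀ i ∈ indecies, PySem.Raise.InRange raw.length i ∧
    (PySem.List.pyGetD raw i "").toList.length ≤ row_scores.length ∧
    ∀ k < (PySem.List.pyGetD raw i "").toList.length,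
      row_scores.getD k 0 ∈ ([0, 1, 2, 3] : List Int) ∧
      (PySem.List.pyGetD raw i "").toList.getD k ' ' ∈ (['C', 'T', 'G', 'A'] : List Char)

instance (indecies : List Int) (raw : List String) (row_scores : List Int) : Decidable (Pre_score_indecies_py indecies raw row_scores) := by unfold Pre_score_indecies_py; infer_instance

def pvWitness_score_indecies_py : List Int × List String × List Int := ([0, -1, 1], ["CAT", "G"], [1, 0, 3])

def Spec_score_indecies_py (indecies : List Int) (raw : List String) (row_scores : List Int) (out : List Int) : Prop := out = score_indecies_py_alt indecies raw row_scores
instance (indecies : List Int) (raw : List String) (row_scores : List Int) (out : List Int) : Decidable (Spec_score_indecies_py indecies raw row_scores out) := by unfold Spec_score_indecies_py; infer_instance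

-- ===== CLAIM (what is proved, stated in full; the proofs are below) =====
def Claim_equal_score_indecies_py : Prop := ∀ (indecies : List Int) (raw : List String) (row_scores : List Int), Dom_score_indecies_py indecies raw row_scores → Pre_score_indecies_py indecies raw row_scores → Spec_score_indecies_py indecies raw row_scores (score_indecies_py indecies raw row_scores)

-- ===== LEMMAS AND PROOFS =====

-- the per-character contributions, as functions of the (Nat) position and the character
def fA (row_scores : List Int) (k : Nat) (c : Char) : Int :=
  PySem.Dict.getD (PySem.Dict.getD scoringA (row_scores.getD k 0) (PySem.Dict.ofList [])) c 0
def fB (row_scores : List Int) (k : Nat) (c : Char) : Int :=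
  PySem.List.pyGetD (PySem.Dict.getD scoringB c []) (row_scores.getD k 0) 0

-- canonical positional sum over a row
def Q (F : Nat → Char → Int) : List Char → Int
  | [] => 0
  | c :: t => F 0 c + Q (fun k => F (k + 1)) t

theorem Q_congr (r : List Char) (F G : Nat → Char → Int)
    (h : ∀ k, k < r.length → F k (r.getD k ' ') = G k (r.getD k ' ')) : Q F r = Q G r := by
  induction r generalizing F G with
  | nil => rfl
  | cons c t ih =>
    simp only [Q]
    have h0 := h 0 (by simp)
    simp only [List.getD_cons_zero] at h0
    rw [h0, ih (fun k => F (k + 1)) (fun k => G (k + 1))]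
    intro k hk
    have := h (k + 1) (by simpa using hk)
    simpa using this

theorem Q_append_singleton (l : List Char) (c : Char) (F : Nat → Char → Int) :
    Q F (l ++ [c]) = Q F l + F l.length c := by
  induction l generalizing F with
  | nil => simp [Q]
  | cons x t ih => simp [Q, ih]; ring

theorem enum_foldl (r : List Char) (G : Int → Char → Int) (s : Nat) (acc : Int) :
    (PySem.List.enumerate r (s : Int)).foldl (fun sc ke => sc + G ke.1 ke.2) acc
      = acc + Q (fun k c => G ((s + k : Nat) : Int) c) r := by
  induction r generalizing s acc with
  | nil => simp [PySem.List.enumerate_nil, Q]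
  | cons c t ih =>
    rw [PySem.List.enumerate_cons]
    simp only [List.foldl_cons]
    have : ((s : Int) + 1) = ((s + 1 : Nat) : Int) := by push_cast; ring
    rw [this, ih]
    simp only [Q]
    have : (fun k c => G ((s + 1 + k : Nat) : Int) c) = (fun k c => G ((s + (k + 1) : Nat) : Int) c) := by
      funext k c; congr 1; omega
    rw [this]
    ring_nf

-- the column sweep computes, per row, the positional sum of the first W characters
theorem col_sweep (rows : List (List Char)) (row_scores : List Int) (W : Nat) :
    (List.range W).foldl
      (fun (scores : List Int) (k : Nat) =>
        List.zipWith
          (fun sc r =>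
            sc + (if (k : Int) < (r.length : Int) then
                    PySem.List.pyGetD (PySem.Dict.getD scoringB (PySem.List.pyGetD r (k : Int) ' ') [])
                      (PySem.List.pyGetD row_scores (k : Int) 0) 0
                  else 0))
          scores rows)
      (List.replicate rows.length 0)
      = rows.map (fun r => Q (fB row_scores) (r.take W)) := by
  induction W with
  | zero =>
    rw [show (fun r : List Char => Q (fB row_scores) (r.take 0)) = fun _ => (0 : Int) from rfl,
      List.map_const']
    rfl
  | succ W ih =>
    rw [List.range_succ, List.foldl_append, ih]
    simp only [List.foldl_cons, List.foldl_nil]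
    rw [List.zipWith_map_left, List.zipWith_self]
    apply List.map_congr_left
    intro r _
    by_cases hW : W < r.length
    · have hcast : ((W : Int) < (r.length : Int)) := by exact_mod_cast hW
      rw [if_pos hcast]
      have htake : r.take (W + 1) = r.take W ++ [r[W]] := by
        rw [List.take_add_one, List.getElem?_eq_getElem hW]; rfl
      rw [htake, Q_append_singleton]
      have hlen : (r.take W).length = W := by simp [List.length_take]; omega
      rw [hlen]
      simp only [fB, PySem.List.pyGetD_natCast]
      rw [List.getD_eq_getElem r ' ' hW]
    · have hcast : ¬ ((W : Int) < (r.length : Int)) := by exact_mod_cast hW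
      rw [if_neg hcast]
      have h1 : r.take (W + 1) = r := List.take_of_length_le (by omega)
      have h2 : r.take W = r := List.take_of_length_le (by omega)
      rw [h1, h2]; ring

-- the two lookups agree on valid row-score values and nucleotides
theorem table_agree (v : Int) (c : Char)
    (hv : v ∈ ([0, 1, 2, 3] : List Int)) (hc : c ∈ (['C', 'T', 'G', 'A'] : List Char)) :
    PySem.Dict.getD (PySem.Dict.getD scoringA v (PySem.Dict.ofList [])) c 0
      = PySem.List.pyGetD (PySem.Dict.getD scoringB c []) v 0 := by
  fin_cases hv <;> fin_cases hc <;> decide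

-- ===== VERDICT (by name: the statement is the Claim_ definition above) =====
theorem score_indecies_py_spec : Claim_equal_score_indecies_py := by
  intro indecies raw row_scores _hdom hpre
  unfold Spec_score_indecies_py
  simp only [score_indecies_py, score_indecies_py_alt]
  rw [PySem.List.foldl_append_singleton_eq_map, List.nil_append]
  rw [PySem.List.pyRange_one]
  have hmax := PySem.List.le_foldl_max_int (indecies.map (fun i => (PySem.List.pyGetD raw i "").toList))
      (fun r => (r.length : Int)) 0
  set width : Int := (indecies.map (fun i => (PySem.List.pyGetD raw i "").toList)).foldl
      (fun w r => max w (r.length : Int)) 0 with hwdef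
  have hw0 : 0 ≤ width := hmax.1
  have hcast : (List.range (width - 0).toNat).map (fun k : Nat => (0 : Int) + k)
      = (List.range width.toNat).map (fun k : Nat => (k : Int)) := by
    simp
  rw [hcast, List.foldl_map]
  rw [col_sweep (indecies.map (fun i => (PySem.List.pyGetD raw i "").toList)) row_scores width.toNat]
  rw [List.map_map]
  apply List.map_congr_left
  intro i hi
  obtain ⟨_hin, hlen, hk⟩ := hpre i hi
  simp only [Function.comp]
  set r := (PySem.List.pyGetD raw i "").toList with hr
  have hrw : r.length ≤ width.toNat := by
    have := hmax.2 r (by rw [hr]; exact List.mem_map_of_mem hi)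
    omega
  rw [List.take_of_length_le hrw]
  rw [show PySem.List.enumerate r = PySem.List.enumerate r ((0 : Nat) : Int) by norm_num,
    enum_foldl r (fun k c => (scoringA.getD (PySem.List.pyGetD row_scores k 0) (PySem.Dict.ofList [])).getD c 0) 0 0,
    zero_add]
  apply Q_congr
  intro k hkr
  simp only [Nat.zero_add, PySem.List.pyGetD_natCast, fB]
  obtain ⟨hv, hc⟩ := hk k hkr
  exact table_agree _ _ hv hc
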